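-- pv_equiv track=rewrite | github.com/ChandieFae/GeniusDNA | genius_dna.py | _categorize_trait
-- ===== SOURCE A (Python) =====
-- def _categorize_trait(trait: str) -> str:
--     """Categorize a trait into main categories"""
--     trait_lower = trait.lower()
--
--     # Check cognitive first (more specific) to avoid 'metabolism' matching detox
--     if any(term in trait_lower for term in ['cognitive', 'dopamine', 'neuroplasticity', 'alzheimer', 'brain']):
--         return 'cognitive'
--     elif 'methylation' in trait_lower:
--         return 'methylation'
--     elif 'vitamin d' in trait_lower:
--         return 'vitamin_d'
--     elif any(term in trait_lower for term in ['fat', 'obesity', 'weight']):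
--         return 'fat_metabolism'
--     elif any(term in trait_lower for term in ['mitochondrial', 'energy', 'uncoupling', 'biogenesis']):
--         return 'mitochondrial'
--     elif any(term in trait_lower for term in ['detox', 'drug', 'caffeine', 'glutathione', 'phase']):
--         return 'detox'
--     elif any(term in trait_lower for term in ['aging', 'longevity', 'inflammation', 'cellular']):
--         return 'aging'
--
--     return None
-- ===== SOURCE B (Python) =====
-- # Text-driven scan: walk the lowered trait once position by position and keep
-- # the minimal-priority keyword that starts at any position (instead of a
-- # term-driven if/elif chain of whole-string substring tests).
-- _TERMS = [
--     ('cognitive', 0), ('dopamine', 0), ('neuroplasticity', 0), ('alzheimer', 0), ('brain', 0),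
--     ('methylation', 1),
--     ('vitamin d', 2),
--     ('fat', 3), ('obesity', 3), ('weight', 3),
--     ('mitochondrial', 4), ('energy', 4), ('uncoupling', 4), ('biogenesis', 4),
--     ('detox', 5), ('drug', 5), ('caffeine', 5), ('glutathione', 5), ('phase', 5),
--     ('aging', 6), ('longevity', 6), ('inflammation', 6), ('cellular', 6),
-- ]
-- _CATS = ['cognitive', 'methylation', 'vitamin_d', 'fat_metabolism',
--          'mitochondrial', 'detox', 'aging']
--
-- def _categorize_trait(trait: str) -> str:
--     t = trait.lower()
--     best = len(_CATS)  # sentinel: nothing matched yet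
--     for i in range(len(t)):
--         for term, rank in _TERMS:
--             if rank < best and t.startswith(term, i):
--                 best = rank
--     return _CATS[best] if best < len(_CATS) else None
-- ===== Notes on version B (the rewrite author's own statement) =====
-- stated objective: alternative
-- what changed: Replaced the term-driven if/elif chain of whole-string substring tests by a text-driven single scan: walk the lowered trait position by position, check which keyword starts at each position, and keep the minimal-priority match in an accumulator.
import Mathlib
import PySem

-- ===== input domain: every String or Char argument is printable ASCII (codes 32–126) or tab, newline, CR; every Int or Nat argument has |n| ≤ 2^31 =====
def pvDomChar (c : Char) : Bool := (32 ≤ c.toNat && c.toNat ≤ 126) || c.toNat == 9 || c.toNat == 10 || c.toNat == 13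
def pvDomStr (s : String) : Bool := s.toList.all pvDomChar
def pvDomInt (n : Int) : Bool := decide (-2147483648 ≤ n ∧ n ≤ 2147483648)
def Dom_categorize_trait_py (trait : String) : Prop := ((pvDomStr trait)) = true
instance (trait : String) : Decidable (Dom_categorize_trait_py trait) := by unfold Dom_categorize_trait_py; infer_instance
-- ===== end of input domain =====

-- B replaces A's term-driven if/elif chain of substring tests by a text-driven
-- single scan over positions keeping the minimal-priority keyword match
-- (objective: alternative); return values agree on all inputs.

-- ===== PORT A =====
def categorize_trait_py (trait : String) : Option String :=
  let trait_lower := PySem.Str.lower trait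
  if ["cognitive", "dopamine", "neuroplasticity", "alzheimer", "brain"].any
       (fun term => PySem.Str.isIn term trait_lower) then some "cognitive"
  else if PySem.Str.isIn "methylation" trait_lower then some "methylation"
  else if PySem.Str.isIn "vitamin d" trait_lower then some "vitamin_d"
  else if ["fat", "obesity", "weight"].any
       (fun term => PySem.Str.isIn term trait_lower) then some "fat_metabolism"
  else if ["mitochondrial", "energy", "uncoupling", "biogenesis"].any
       (fun term => PySem.Str.isIn term trait_lower) then some "mitochondrial"
  else if ["detox", "drug", "caffeine", "glutathione", "phase"].any
       (fun term => PySem.Str.isIn term trait_lower) then some "detox"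
  else if ["aging", "longevity", "inflammation", "cellular"].any
       (fun term => PySem.Str.isIn term trait_lower) then some "aging"
  else none

-- ===== PORT B =====
-- the (term, priority rank) table _TERMS and the category list _CATS of Source B
def pvTerms : List (String × Nat) :=
  [ ("cognitive", 0), ("dopamine", 0), ("neuroplasticity", 0), ("alzheimer", 0), ("brain", 0),
    ("methylation", 1),
    ("vitamin d", 2),
    ("fat", 3), ("obesity", 3), ("weight", 3),
    ("mitochondrial", 4), ("energy", 4), ("uncoupling", 4), ("biogenesis", 4),
    ("detox", 5), ("drug", 5), ("caffeine", 5), ("glutathione", 5), ("phase", 5),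
    ("aging", 6), ("longevity", 6), ("inflammation", 6), ("cellular", 6) ]

def pvCats : List String :=
  ["cognitive", "methylation", "vitamin_d", "fat_metabolism", "mitochondrial", "detox", "aging"]

-- inner 'for term, rank in _TERMS' loop at position i; Python's t.startswith(term, i)
-- with 0 ≤ i is exactly 'term.toList is a prefix of t.drop i' (PySem.Chars.startswith)
def pvInner (t : List Char) (i : Int) (best : Nat) : Nat :=
  pvTerms.foldl
    (fun best tr =>
      if tr.2 < best ∧ PySem.Chars.startswith (t.drop i.toNat) tr.1.toList = true
      then tr.2 else best) best

-- outer 'for i in range(len(t))' loop, best starting at len(_CATS) = 7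
def pvBest (t : List Char) : Nat :=
  (PySem.List.pyRange 0 (t.length : Int) 1).foldl (fun best i => pvInner t i best) 7

def categorize_trait_py_alt (trait : String) : Option String :=
  let t := (PySem.Str.lower trait).toList
  let best := pvBest t
  if best < 7 then some (pvCats.getD best "") else none

-- ===== PRECONDITION & SPEC =====
def Spec_categorize_trait_py (trait : String) (out : Option String) : Prop := out = categorize_trait_py_alt trait
instance (trait : String) (out : Option String) : Decidable (Spec_categorize_trait_py trait out) := by unfold Spec_categorize_trait_py; infer_instance

-- ===== CLAIM (what is proved, stated in full; the proofs are below) =====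
def Claim_equal_categorize_trait_py : Prop := ∀ (trait : String), Dom_categorize_trait_py trait → Spec_categorize_trait_py trait (categorize_trait_py trait)

-- ===== LEMMAS AND PROOFS =====

-- step of the inner loop lowers 'best' to rank tr.2 exactly when tr starts at i
lemma pvStep_le (t : List Char) (i : Int) (b m : Nat) (tr : String × Nat) :
    (if tr.2 < b ∧ PySem.Chars.startswith (t.drop i.toNat) tr.1.toList = true
     then tr.2 else b) ≤ m ↔
      b ≤ m ∨ (PySem.Chars.startswith (t.drop i.toNat) tr.1.toList = true ∧ tr.2 ≤ m) := by
  split_ifs with h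
  · obtain ⟨h1, h2⟩ := h
    constructor
    · intro hm; exact Or.inr ⟨h2, hm⟩
    · rintro (hm | ⟨_, hm⟩) <;> omega
  · constructor
    · intro hm; exact Or.inl hm
    · rintro (hm | ⟨hsw, hm⟩)
      · exact hm
      · have : ¬ tr.2 < b := fun hlt => h ⟨hlt, hsw⟩
        omega

-- Galois characterization of the inner loop over any tail of the term table
lemma pvInnerAux (t : List Char) (i : Int) :
    ∀ (l : List (String × Nat)) (b m : Nat),
      (l.foldl
        (fun best tr =>
          if tr.2 < best ∧ PySem.Chars.startswith (t.drop i.toNat) tr.1.toList = true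
          then tr.2 else best) b) ≤ m ↔
        b ≤ m ∨ ∃ tr ∈ l,
          PySem.Chars.startswith (t.drop i.toNat) tr.1.toList = true ∧ tr.2 ≤ m := by
  intro l
  induction l with
  | nil => simp
  | cons x xs ih =>
      intro b m
      rw [List.foldl_cons, ih, pvStep_le]
      simp only [List.exists_mem_cons_iff]
      rw [or_assoc]

lemma pvInner_le (t : List Char) (i : Int) (b m : Nat) :
    pvInner t i b ≤ m ↔
      b ≤ m ∨ ∃ tr ∈ pvTerms,
        PySem.Chars.startswith (t.drop i.toNat) tr.1.toList = true ∧ tr.2 ≤ m := by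
  unfold pvInner
  exact pvInnerAux t i pvTerms b m

-- Galois characterization of the outer position loop over any list of positions
lemma pvBestAux (t : List Char) :
    ∀ (l : List Int) (c m : Nat),
      (l.foldl (fun best i => pvInner t i best) c) ≤ m ↔
        c ≤ m ∨ ∃ i ∈ l, ∃ tr ∈ pvTerms,
          PySem.Chars.startswith (t.drop i.toNat) tr.1.toList = true ∧ tr.2 ≤ m := by
  intro l
  induction l with
  | nil => simp
  | cons x xs ih =>
      intro c m
      rw [List.foldl_cons, ih, pvInner_le]
      simp only [List.exists_mem_cons_iff]
      rw [or_assoc]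

-- 'some nonempty term starts at some scanned position' = 'term is a substring'
lemma pvExistsPos (t term : List Char) (hne : term ≠ []) :
    (∃ i ∈ PySem.List.pyRange 0 (t.length : Int) 1,
        PySem.Chars.startswith (t.drop i.toNat) term = true) ↔
      PySem.Chars.isIn term t = true := by
  rw [← PySem.Chars.exists_prefix_drop_iff_isIn]
  constructor
  · rintro ⟨i, _, hsw⟩
    exact ⟨i.toNat, (PySem.Chars.startswith_iff _ _).mp hsw⟩
  · rintro ⟨j, hj⟩
    have hjlt : j < t.length := by
      by_contra h
      rw [List.drop_eq_nil_of_le (by omega)] at hj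
      exact hne (List.prefix_nil.mp hj)
    refine ⟨(j : Int), ?_, ?_⟩
    · rw [PySem.List.mem_pyRange_one]
      constructor <;> [positivity; exact_mod_cast hjlt]
    · simpa [PySem.Chars.startswith_iff] using hj
lemma pvBest_le (t : List Char) (m : Nat) :
    pvBest t ≤ m ↔
      7 ≤ m ∨ ∃ tr ∈ pvTerms, PySem.Chars.isIn tr.1.toList t = true ∧ tr.2 ≤ m := by
  unfold pvBest
  rw [pvBestAux]
  constructor
  · rintro (h | ⟨i, hi, tr, htr, hsw, hm⟩)
    · exact Or.inl h
    · refine Or.inr ⟨tr, htr, ?_, hm⟩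
      have hne : tr.1.toList ≠ [] := by fin_cases htr <;> decide
      exact (pvExistsPos t tr.1.toList hne).mp ⟨i, hi, hsw⟩
  · rintro (h | ⟨tr, htr, hin, hm⟩)
    · exact Or.inl h
    · have hne : tr.1.toList ≠ [] := by fin_cases htr <;> decide
      obtain ⟨i, hi, hsw⟩ := (pvExistsPos t tr.1.toList hne).mpr hin
      exact Or.inr ⟨i, hi, tr, htr, hsw, hm⟩

-- ===== VERDICT (by name: the statement is the Claim_ definition above) =====
theorem categorize_trait_py_spec : Claim_equal_categorize_trait_py := by
  intro trait _
  unfold Spec_categorize_trait_py categorize_trait_py categorize_trait_py_alt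
  simp only [List.any_cons, List.any_nil, Bool.or_false, Bool.or_eq_true,
    PySem.Str.isIn_eq, PySem.Str.toList_lower]
  set s := PySem.Chars.lower trait.toList with hs
  have hle : ∀ m, pvBest s ≤ m ↔
      7 ≤ m ∨ ∃ tr ∈ pvTerms, PySem.Chars.isIn tr.1.toList s = true ∧ tr.2 ≤ m :=
    fun m => pvBest_le s m
  have h7 : pvBest s ≤ 7 := (hle 7).mpr (Or.inl le_rfl)
  by_cases h0 : PySem.Chars.isIn "cognitive".toList s = true ∨ PySem.Chars.isIn "dopamine".toList s = true ∨ PySem.Chars.isIn "neuroplasticity".toList s = true ∨ PySem.Chars.isIn "alzheimer".toList s = true ∨ PySem.Chars.isIn "brain".toList s = true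
  · rw [if_pos h0]
    have hub : pvBest s ≤ 0 := (hle 0).mpr (Or.inr (by
      rcases h0 with h|h|h|h|h
      exacts [⟨("cognitive", 0), by decide, h, by omega⟩, ⟨("dopamine", 0), by decide, h, by omega⟩, ⟨("neuroplasticity", 0), by decide, h, by omega⟩, ⟨("alzheimer", 0), by decide, h, by omega⟩, ⟨("brain", 0), by decide, h, by omega⟩]))
    have heq : pvBest s = 0 := by omega
    rw [heq]
    decide
  · rw [if_neg h0]
    by_cases h1 : PySem.Chars.isIn "methylation".toList s = true
    · rw [if_pos h1]
      have hub : pvBest s ≤ 1 := (hle 1).mpr (Or.inr ⟨("methylation", 1), by decide, h1, by omega⟩)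
      have hlb : ¬ pvBest s ≤ 0 := by
        intro hc
        rcases (hle 0).mp hc with h7' | ⟨tr, htr, hin, hrk⟩
        · omega
        · clear hle h7 hc
          fin_cases htr <;> simp_all
      have heq : pvBest s = 1 := by omega
      rw [heq]
      decide
    · rw [if_neg h1]
      by_cases h2 : PySem.Chars.isIn "vitamin d".toList s = true
      · rw [if_pos h2]
        have hub : pvBest s ≤ 2 := (hle 2).mpr (Or.inr ⟨("vitamin d", 2), by decide, h2, by omega⟩)
        have hlb : ¬ pvBest s ≤ 1 := by
          intro hc
          rcases (hle 1).mp hc with h7' | ⟨tr, htr, hin, hrk⟩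
          · omega
          · clear hle h7 hc
            fin_cases htr <;> simp_all
        have heq : pvBest s = 2 := by omega
        rw [heq]
        decide
      · rw [if_neg h2]
        by_cases h3 : PySem.Chars.isIn "fat".toList s = true ∨ PySem.Chars.isIn "obesity".toList s = true ∨ PySem.Chars.isIn "weight".toList s = true
        · rw [if_pos h3]
          have hub : pvBest s ≤ 3 := (hle 3).mpr (Or.inr (by
            rcases h3 with h|h|h
            exacts [⟨("fat", 3), by decide, h, by omega⟩, ⟨("obesity", 3), by decide, h, by omega⟩, ⟨("weight", 3), by decide, h, by omega⟩]))
          have hlb : ¬ pvBest s ≤ 2 := by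
            intro hc
            rcases (hle 2).mp hc with h7' | ⟨tr, htr, hin, hrk⟩
            · omega
            · clear hle h7 hc
              fin_cases htr <;> simp_all
          have heq : pvBest s = 3 := by omega
          rw [heq]
          decide
        · rw [if_neg h3]
          by_cases h4 : PySem.Chars.isIn "mitochondrial".toList s = true ∨ PySem.Chars.isIn "energy".toList s = true ∨ PySem.Chars.isIn "uncoupling".toList s = true ∨ PySem.Chars.isIn "biogenesis".toList s = true
          · rw [if_pos h4]
            have hub : pvBest s ≤ 4 := (hle 4).mpr (Or.inr (by
              rcases h4 with h|h|h|h
              exacts [⟨("mitochondrial", 4), by decide, h, by omega⟩, ⟨("energy", 4), by decide, h, by omega⟩, ⟨("uncoupling", 4), by decide, h, by omega⟩, ⟨("biogenesis", 4), by decide, h, by omega⟩]))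
            have hlb : ¬ pvBest s ≤ 3 := by
              intro hc
              rcases (hle 3).mp hc with h7' | ⟨tr, htr, hin, hrk⟩
              · omega
              · clear hle h7 hc
                fin_cases htr <;> simp_all
            have heq : pvBest s = 4 := by omega
            rw [heq]
            decide
          · rw [if_neg h4]
            by_cases h5 : PySem.Chars.isIn "detox".toList s = true ∨ PySem.Chars.isIn "drug".toList s = true ∨ PySem.Chars.isIn "caffeine".toList s = true ∨ PySem.Chars.isIn "glutathione".toList s = true ∨ PySem.Chars.isIn "phase".toList s = true
            · rw [if_pos h5]
              have hub : pvBest s ≤ 5 := (hle 5).mpr (Or.inr (by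
                rcases h5 with h|h|h|h|h
                exacts [⟨("detox", 5), by decide, h, by omega⟩, ⟨("drug", 5), by decide, h, by omega⟩, ⟨("caffeine", 5), by decide, h, by omega⟩, ⟨("glutathione", 5), by decide, h, by omega⟩, ⟨("phase", 5), by decide, h, by omega⟩]))
              have hlb : ¬ pvBest s ≤ 4 := by
                intro hc
                rcases (hle 4).mp hc with h7' | ⟨tr, htr, hin, hrk⟩
                · omega
                · clear hle h7 hc
                  fin_cases htr <;> simp_all
              have heq : pvBest s = 5 := by omega
              rw [heq]
              decide
            · rw [if_neg h5]
              by_cases h6 : PySem.Chars.isIn "aging".toList s = true ∨ PySem.Chars.isIn "longevity".toList s = true ∨ PySem.Chars.isIn "inflammation".toList s = true ∨ PySem.Chars.isIn "cellular".toList s = true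
              · rw [if_pos h6]
                have hub : pvBest s ≤ 6 := (hle 6).mpr (Or.inr (by
                  rcases h6 with h|h|h|h
                  exacts [⟨("aging", 6), by decide, h, by omega⟩, ⟨("longevity", 6), by decide, h, by omega⟩, ⟨("inflammation", 6), by decide, h, by omega⟩, ⟨("cellular", 6), by decide, h, by omega⟩]))
                have hlb : ¬ pvBest s ≤ 5 := by
                  intro hc
                  rcases (hle 5).mp hc with h7' | ⟨tr, htr, hin, hrk⟩
                  · omega
                  · clear hle h7 hc
                    fin_cases htr <;> simp_all
                have heq : pvBest s = 6 := by omega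
                rw [heq]
                decide
              · rw [if_neg h6]
                have hlb : ¬ pvBest s ≤ 6 := by
                  intro hc
                  rcases (hle 6).mp hc with h7' | ⟨tr, htr, hin, hrk⟩
                  · omega
                  · clear hle h7 hc
                    fin_cases htr <;> simp_all
                have heq : pvBest s = 7 := by omega
                rw [heq]
                decide
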